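-- pv_equiv track=rewrite | github.com/gaps-closure/capo | partitioner/src/dot_reader.py | token_with_escape
-- ===== SOURCE A (Python) =====
-- def token_with_escape(a, escape = '\\', separator = ',', quote='"'):
--     result = []
--     token = ''
--     state = 0#0 is normal, 1 is escaped, 2 is quoted, 3 is quoted and escaped
--     for c in a:
--         if state == 0:
--             if c == escape:
--                 state = 1
--             elif c == separator:
--                 result.append(token)
--                 token = ''
--             elif c == quote:
--                 state = 2
--             else:
--                 token += c
--         elif state == 1:
--             token += c
--             state = 0
--         elif state == 2:
--             if c == escape:
--                 state = 3
--                 token += c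
--             elif c == quote:
--                 state = 0
--             else:
--                 token += c
--         elif state == 3:
--             token += c
--             state = 2
--     result.append(token)
--     return result
-- ===== SOURCE B (Python) =====
-- def token_with_escape(a, escape='\\', separator=',', quote='"'):
--     result = []
--     token = ''
--     in_quote = False
--     i = 0
--     n = len(a)
--     while i < n:
--         c = a[i]
--         if c == escape:
--             if i + 1 < n:
--                 token += (c + a[i + 1]) if in_quote else a[i + 1]
--                 i += 2
--             else:
--                 if in_quote:
--                     token += c
--                 i += 1
--             continue
--         if in_quote:
--             if c == quote:
--                 in_quote = False
--             else:
--                 token += c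
--         elif c == separator:
--             result.append(token)
--             token = ''
--         elif c == quote:
--             in_quote = True
--         else:
--             token += c
--         i += 1
--     result.append(token)
--     return result
-- ===== Notes on version B (the rewrite author's own statement) =====
-- stated objective: simpler
-- what changed: Replaces A's four-state (normal/escaped/quoted/quoted-escaped) state machine with an index-based lookahead loop that keeps only an in_quote flag and consumes the character after an escape directly via i += 2.
import Mathlib
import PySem

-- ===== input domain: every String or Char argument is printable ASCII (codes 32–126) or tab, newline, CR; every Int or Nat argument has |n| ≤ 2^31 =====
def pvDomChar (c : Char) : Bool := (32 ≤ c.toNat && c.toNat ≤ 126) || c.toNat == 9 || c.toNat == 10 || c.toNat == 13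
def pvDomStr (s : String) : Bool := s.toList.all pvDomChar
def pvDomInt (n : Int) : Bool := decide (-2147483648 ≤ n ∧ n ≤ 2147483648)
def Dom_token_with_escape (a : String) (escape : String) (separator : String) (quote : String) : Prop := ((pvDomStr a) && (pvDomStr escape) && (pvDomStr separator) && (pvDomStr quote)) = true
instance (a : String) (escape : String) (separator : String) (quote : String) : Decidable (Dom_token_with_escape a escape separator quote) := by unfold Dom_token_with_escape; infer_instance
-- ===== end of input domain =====

-- B rewrites A's four-state character machine as an index/lookahead two-state loop (single in_quote flag,
-- escape handled by consuming the next character directly); objective: simpler decomposition, same cost.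

-- Python's `c == s` where c is one char of the string and s a parameter string (exact on all strings)
def pvChEq (c : Char) (s : String) : Bool := s == String.mk [c]

-- ===== PORT A =====
-- A's for-loop over the characters, state 0/1/2/3 exactly as in the Python
def pvLoopA (esc sep q : String) : List Char → List String → List Char → Nat → List String
  | [], result, token, _ => result ++ [String.mk token]
  | c :: rest, result, token, state =>
    if state == 0 then
      if pvChEq c esc then pvLoopA esc sep q rest result token 1
      else if pvChEq c sep then pvLoopA esc sep q rest (result ++ [String.mk token]) [] 0
      else if pvChEq c q then pvLoopA esc sep q rest result token 2
      else pvLoopA esc sep q rest result (token ++ [c]) 0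
    else if state == 1 then pvLoopA esc sep q rest result (token ++ [c]) 0
    else if state == 2 then
      if pvChEq c esc then pvLoopA esc sep q rest result (token ++ [c]) 3
      else if pvChEq c q then pvLoopA esc sep q rest result token 0
      else pvLoopA esc sep q rest result (token ++ [c]) 2
    else pvLoopA esc sep q rest result (token ++ [c]) 2

def token_with_escape (a : String) (escape : String) (separator : String) (quote : String) : List String :=
  pvLoopA escape separator quote a.toList [] [] 0

-- ===== PORT B =====
-- B's while loop with index lookahead, transcribed as recursion consuming one or two characters
def pvLoopB (esc sep q : String) : List Char → Bool → List Char → List String → List String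
  | [], _, token, result => result ++ [String.mk token]
  | c :: rest, inq, token, result =>
    if pvChEq c esc then
      match rest with
      | d :: rest' =>
        pvLoopB esc sep q rest' inq (token ++ (if inq then [c, d] else [d])) result
      | [] =>
        result ++ [String.mk (if inq then token ++ [c] else token)]
    else if inq then
      if pvChEq c q then pvLoopB esc sep q rest false token result
      else pvLoopB esc sep q rest true (token ++ [c]) result
    else if pvChEq c sep then pvLoopB esc sep q rest false [] (result ++ [String.mk token])
    else if pvChEq c q then pvLoopB esc sep q rest true token result
    else pvLoopB esc sep q rest false (token ++ [c]) result

def token_with_escape_alt (a : String) (escape : String) (separator : String) (quote : String) : List String :=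
  pvLoopB escape separator quote a.toList false [] []

-- ===== PRECONDITION & SPEC =====
def Spec_token_with_escape (a : String) (escape : String) (separator : String) (quote : String) (out : List String) : Prop := out = token_with_escape_alt a escape separator quote
instance (a : String) (escape : String) (separator : String) (quote : String) (out : List String) : Decidable (Spec_token_with_escape a escape separator quote out) := by unfold Spec_token_with_escape; infer_instance

-- ===== CLAIM (what is proved, stated in full; the proofs are below) =====
def Claim_equal_token_with_escape : Prop := ∀ (a : String) (escape : String) (separator : String) (quote : String), Dom_token_with_escape a escape separator quote → Spec_token_with_escape a escape separator quote (token_with_escape a escape separator quote)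

-- ===== LEMMAS AND PROOFS =====

-- unfolding of B's loop on a non-escape head character (the nested match on `rest` blocks plain simp)
theorem pvLoopB_cons_ne (esc sep q : String) (c : Char) (rest : List Char) (inq : Bool)
    (token : List Char) (result : List String) (h : ¬ pvChEq c esc = true) :
    pvLoopB esc sep q (c :: rest) inq token result =
      (if inq then
        if pvChEq c q then pvLoopB esc sep q rest false token result
        else pvLoopB esc sep q rest true (token ++ [c]) result
      else if pvChEq c sep then pvLoopB esc sep q rest false [] (result ++ [String.mk token])
      else if pvChEq c q then pvLoopB esc sep q rest true token result
      else pvLoopB esc sep q rest false (token ++ [c]) result) := by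
  cases rest <;> simp [pvLoopB, h]

-- the loop invariant: A in state 0 (resp. 2) agrees with B with in_quote = false (resp. true)
theorem pvLoopAB (esc sep q : String) :
    ∀ (n : Nat) (l : List Char), l.length ≤ n → ∀ (inq : Bool) (token : List Char) (result : List String),
      pvLoopA esc sep q l result token (if inq then 2 else 0) = pvLoopB esc sep q l inq token result := by
  intro n
  induction n with
  | zero =>
    intro l hl inq token result
    have : l = [] := List.eq_nil_of_length_eq_zero (Nat.le_zero.mp hl)
    subst this
    cases inq <;> simp [pvLoopA, pvLoopB]
  | succ n ih =>
    intro l hl inq token result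
    cases l with
    | nil => cases inq <;> simp [pvLoopA, pvLoopB]
    | cons c rest =>
      by_cases he : pvChEq c esc = true
      · cases rest with
        | nil =>
          cases inq <;> simp [pvLoopA, pvLoopB, he]
        | cons d rest' =>
          have hlen : rest'.length ≤ n := by simp at hl; omega
          cases inq
          · -- state 0 → 1 → 0
            simpa [pvLoopA, pvLoopB, he] using ih rest' hlen false (token ++ [d]) result
          · -- state 2 → 3 → 2
            simpa [pvLoopA, pvLoopB, he] using ih rest' hlen true (token ++ [c, d]) result
      · have hlen : rest.length ≤ n := by simp at hl; omega
        rw [pvLoopB_cons_ne esc sep q c rest inq token result he]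
        cases inq
        · by_cases hs : pvChEq c sep = true
          · simpa [pvLoopA, pvLoopB, he, hs] using ih rest hlen false [] (result ++ [String.mk token])
          · by_cases hq : pvChEq c q = true
            · simpa [pvLoopA, pvLoopB, he, hs, hq] using ih rest hlen true token result
            · simpa [pvLoopA, pvLoopB, he, hs, hq] using ih rest hlen false (token ++ [c]) result
        · by_cases hq : pvChEq c q = true
          · simpa [pvLoopA, pvLoopB, he, hq] using ih rest hlen false token result
          · simpa [pvLoopA, pvLoopB, he, hq] using ih rest hlen true (token ++ [c]) result

-- ===== VERDICT (by name: the statement is the Claim_ definition above) =====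
theorem token_with_escape_spec : Claim_equal_token_with_escape := by
  intro a escape separator quote _
  unfold Spec_token_with_escape token_with_escape token_with_escape_alt
  simpa using pvLoopAB escape separator quote a.toList.length a.toList (le_refl _) false [] []
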